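-- pv_equiv track=rewrite | github.com/Abrar-Sultan/Learning-from-Limited-and-Challenging-Visual-Data | ReMixMatch/utils.py | interleave_offsets
-- ===== SOURCE A (Python) =====
-- def interleave_offsets(batch_size, nu):
--     '''
--     this code is adopted from: https://github.com/TorchSSL/TorchSSL/tree/main/models/remixmatch
--     '''
--     # nu = number of unlabeled groups
--     groups = [batch_size // (nu + 1)] * (nu + 1)
--     for x in range(batch_size - sum(groups)):
--         groups[-x - 1] += 1
--     offsets = [0]
--     for g in groups:
--         offsets.append(offsets[-1] + g)
--     return offsets
-- ===== SOURCE B (Python) =====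
-- def interleave_offsets(batch_size, nu):
--     # closed form: q = size of each group, last r groups get one extra
--     q, r = divmod(batch_size, nu + 1)
--     t = nu + 1 - r
--     return [i * q + max(0, i - t) for i in range(nu + 2)]
-- ===== Notes on version B (the rewrite author's own statement) =====
-- stated objective: simpler
-- what changed: Replaces the group list, remainder-distribution loop and prefix-sum loop by a single closed-form comprehension i*q + max(0, i - (nu+1-r)) over range(nu+2) using divmod.
-- outside the precondition, e.g. on interleave_offsets(0, -2): A returns [0], B returns []
import Mathlib
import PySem

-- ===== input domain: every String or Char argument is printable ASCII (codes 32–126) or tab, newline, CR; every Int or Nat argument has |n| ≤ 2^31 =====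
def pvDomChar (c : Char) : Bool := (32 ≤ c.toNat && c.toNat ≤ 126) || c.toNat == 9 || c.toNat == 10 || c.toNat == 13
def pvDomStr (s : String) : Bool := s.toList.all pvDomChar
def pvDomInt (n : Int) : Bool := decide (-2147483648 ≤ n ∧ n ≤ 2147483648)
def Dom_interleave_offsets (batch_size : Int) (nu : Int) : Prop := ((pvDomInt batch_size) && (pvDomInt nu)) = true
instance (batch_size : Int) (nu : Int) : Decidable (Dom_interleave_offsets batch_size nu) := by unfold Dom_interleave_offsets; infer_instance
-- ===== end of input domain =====

-- B replaces A's remainder-distribution and prefix-sum loops by one closed-form comprehension (objective: simpler).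

-- ===== PORT A =====
-- groups[-x-1] += 1 : negative-index in-place increment; exact for -len ≤ index < len (guaranteed inside Pre_)
def pySetAdd1 (l : List Int) (i : Int) : List Int :=
  let j := if i < 0 then i + l.length else i
  l.modify j.toNat (· + 1)

def interleave_offsets (batch_size : Int) (nu : Int) : List Int :=
  let groups := List.replicate (nu + 1).toNat (PySem.Int.floordiv batch_size (nu + 1))
  let groups := (PySem.List.pyRange 0 (batch_size - groups.sum) 1).foldl
      (fun g x => pySetAdd1 g (-x - 1)) groups
  groups.foldl (fun off g => off ++ [(PySem.List.pyGet? off (-1)).getD 0 + g]) [(0 : Int)]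

-- ===== PORT B =====
def interleave_offsets_alt (batch_size : Int) (nu : Int) : List Int :=
  let q := PySem.Int.floordiv batch_size (nu + 1)
  let r := PySem.Int.mod batch_size (nu + 1)
  let t := nu + 1 - r
  (PySem.List.pyRange 0 (nu + 2) 1).map (fun i => i * q + max 0 (i - t))

-- ===== PRECONDITION & SPEC =====
-- Pre_ restricts to the natural domain nu ≥ 0 (nu = number of unlabeled groups): A raises
-- ZeroDivisionError at nu = -1 and IndexError for nu ≤ -2 with batch_size > 0; the remaining
-- negative-nu corner (nu ≤ -2, batch_size ≤ 0, where A returns [0]) is outside that domain.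
def Pre_interleave_offsets (batch_size : Int) (nu : Int) : Prop := 0 ≤ nu
instance (batch_size : Int) (nu : Int) : Decidable (Pre_interleave_offsets batch_size nu) := by
  unfold Pre_interleave_offsets; infer_instance

def pvWitness_interleave_offsets : Int × Int := (7, 2)

def Spec_interleave_offsets (batch_size : Int) (nu : Int) (out : List Int) : Prop :=
  out = interleave_offsets_alt batch_size nu
instance (batch_size : Int) (nu : Int) (out : List Int) : Decidable (Spec_interleave_offsets batch_size nu out) := by
  unfold Spec_interleave_offsets; infer_instance

-- ===== CLAIM (what is proved, stated in full; the proofs are below) =====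
def Claim_equal_interleave_offsets : Prop := ∀ (batch_size : Int) (nu : Int),
  Dom_interleave_offsets batch_size nu → Pre_interleave_offsets batch_size nu →
  Spec_interleave_offsets batch_size nu (interleave_offsets batch_size nu)

-- ===== LEMMAS AND PROOFS =====

-- modify at the last slot of the leading replicate block
theorem modify_replicate_append (a : Nat) (x : Int) (l : List Int) :
    (List.replicate (a + 1) x ++ l).modify a (· + 1) = List.replicate a x ++ (x + 1) :: l := by
  induction a with
  | zero => simp [List.replicate, List.modify]
  | succ a ih => simpa [List.replicate_succ, List.modify] using ih

-- the remainder loop turns replicate m q into replicate (m-r) q ++ replicate r (q+1)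
theorem dist_loop (m : Nat) (q : Int) (r : Nat) (hr : r ≤ m) :
    (PySem.List.pyRange 0 (r : Int) 1).foldl (fun g x => pySetAdd1 g (-x - 1))
        (List.replicate m q)
      = List.replicate (m - r) q ++ List.replicate r (q + 1) := by
  induction r with
  | zero => simp [PySem.List.pyRange_one_eq_nil]
  | succ r ih =>
      have hr' : r ≤ m := by omega
      have hcast : ((r + 1 : Nat) : Int) = (r : Int) + 1 := by push_cast; ring
      rw [hcast, PySem.List.pyRange_one_succ_right (by positivity), List.foldl_append, ih hr']
      simp only [List.foldl_cons, List.foldl_nil]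
      show pySetAdd1 _ _ = _
      simp only [pySetAdd1]
      have hlen : (List.replicate (m - r) q ++ List.replicate r (q + 1)).length = m := by
        simp; omega
      rw [hlen]
      have hneg : (-(r : Int) - 1 < 0) := by omega
      rw [if_pos hneg]
      have hj : (-(r : Int) - 1 + (m : Int)).toNat = m - 1 - r := by omega
      rw [hj]
      have hsplit : List.replicate (m - r) q = List.replicate ((m - 1 - r) + 1) q := by
        congr 1; omega
      rw [hsplit, modify_replicate_append]
      have h1 : m - 1 - r = m - (r + 1) := by omega
      rw [h1, ← List.replicate_succ]

-- offsets loop = scanl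
theorem fold_off (l : List Int) (acc : List Int) (c : Int) :
    l.foldl (fun off g => off ++ [(PySem.List.pyGet? off (-1)).getD 0 + g]) (acc ++ [c])
      = acc ++ List.scanl (· + ·) c l := by
  induction l generalizing acc c with
  | nil => simp
  | cons g l ih =>
      simp only [List.foldl_cons, PySem.List.pyGet?_neg_one_append_singleton, Option.getD_some,
        List.scanl_cons]
      rw [List.append_assoc acc [c] [c + g]] at *
      have := ih (acc ++ [c]) (c + g)
      simpa using this

theorem scanl_replicate (a : Nat) (v : Int) (c : Int) :
    List.scanl (· + ·) c (List.replicate a v)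
      = (List.range (a + 1)).map (fun k : Nat => c + (k : Int) * v) := by
  induction a generalizing c with
  | zero => simp
  | succ a ih =>
      rw [List.replicate_succ, List.scanl_cons, ih, List.range_succ_eq_map (n := a + 1),
        List.map_cons, List.map_map]
      refine congrArg₂ _ (by simp) (List.map_congr_left fun k _ => ?_)
      simp only [Function.comp]
      push_cast
      ring

theorem scanl_append (l1 l2 : List Int) (c : Int) :
    List.scanl (· + ·) c (l1 ++ l2)
      = (List.scanl (· + ·) c l1).dropLast ++ List.scanl (· + ·) (c + l1.sum) l2 := by
  induction l1 generalizing c with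
  | nil => simp
  | cons a l1 ih =>
      have hne : List.scanl (· + ·) (c + a) l1 ≠ [] := by
        have h := List.length_scanl (init := c + a) (as := l1) (f := (· + ·))
        intro hn; rw [hn] at h; simp at h
      simp only [List.cons_append, List.scanl_cons, ih, List.sum_cons]
      rw [List.dropLast_cons_of_ne_nil hne]
      simp [add_assoc]

-- ===== VERDICT (by name: the statement is the Claim_ definition above) =====
theorem interleave_offsets_spec : Claim_equal_interleave_offsets := by
  intro bs nu _ hpre
  unfold Spec_interleave_offsets interleave_offsets interleave_offsets_alt
  dsimp only
  have hpos : (0 : Int) < nu + 1 := by exact_mod_cast Int.lt_add_one_of_le hpre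
  set q := PySem.Int.floordiv bs (nu + 1) with hq
  set r := PySem.Int.mod bs (nu + 1) with hr
  have hr0 : 0 ≤ r := by
    rw [hr, PySem.Int.mod_eq_emod_of_pos hpos]; exact Int.emod_nonneg bs (by omega)
  have hrlt : r < nu + 1 := by
    rw [hr, PySem.Int.mod_eq_emod_of_pos hpos]; exact Int.emod_lt_of_pos bs hpos
  set m := (nu + 1).toNat with hmdef
  have hm : (m : Int) = nu + 1 := by omega
  set rn := r.toNat with hrndef
  have hrn : (rn : Int) = r := by omega
  have hrnm : rn < m := by omega
  have hbssum : bs - (List.replicate m q).sum = (rn : Int) := by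
    have hdm := PySem.Int.floordiv_mul_add_mod bs (nu + 1)
    have hmc : q * (nu + 1) = (nu + 1) * q := mul_comm _ _
    simp only [List.sum_replicate, nsmul_eq_mul, hm]
    rw [hrn]; rw [← hq, ← hr] at hdm; linarith
  rw [hbssum, dist_loop m q rn (by omega)]
  have hfold := fold_off (List.replicate (m - rn) q ++ List.replicate rn (q + 1)) [] 0
  simp only [List.nil_append] at hfold
  rw [hfold, scanl_append, scanl_replicate, scanl_replicate]
  have hsum : (List.replicate (m - rn) q).sum = ((m - rn : Nat) : Int) * q := by
    simp [List.sum_replicate]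
  rw [hsum]
  have hrange : List.range (m - rn + 1) = List.range (m - rn) ++ [m - rn] := List.range_succ
  rw [hrange, List.map_append]
  simp only [List.map_cons, List.map_nil]
  rw [List.dropLast_concat]
  -- right-hand side
  have hnu2 : nu + 2 = ((m + 1 : Nat) : Int) := by omega
  rw [hnu2, PySem.List.pyRange_zero_natCast, List.map_map]
  have hm1 : m + 1 = (m - rn) + (rn + 1) := by omega
  rw [hm1, List.range_add (n := m - rn) (m := rn + 1), List.map_append, List.map_map]
  have ht : nu + 1 - r = ((m - rn : Nat) : Int) := by omega
  rw [ht]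
  congr 1
  · refine List.map_congr_left fun k hk => ?_
    have hk' : k < m - rn := List.mem_range.mp hk
    simp only [Function.comp]
    have : max (0 : Int) ((k : Int) - ((m - rn : Nat) : Int)) = 0 := by
      omega
    rw [this]; ring
  · refine List.map_congr_left fun k hk => ?_
    have hk' : k < rn + 1 := List.mem_range.mp hk
    simp only [Function.comp]
    have : max (0 : Int) ((((m - rn) + k : Nat) : Int) - ((m - rn : Nat) : Int)) = (k : Int) := by
      omega
    rw [this]; push_cast; ring
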